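-- pv_equiv track=rewrite | github.com/rslab-ntua/cropmaps | cropmaps/cube.py | _find_previous_and_next_strings
-- ===== SOURCE A (Python) =====
-- def _find_previous_and_next_strings(input_list: list, target_element: str, target_letters: str) -> tuple:
--     """
--     Finds the previous and next strings in a list that contain specific letters, based on a specific element.
--
--     Args:
--     input_list (list of str): A list of strings to search through.
--     target_element (str): The specific element in the list to use as a reference.
--     target_letters (str): The specific letters to search for in the strings.
--
--     Returns:
--     tuple of str: A tuple containing two elements - the previous string (or None if there is no previous string)
--     and the next string (or None if there is no next string) containing the target letters.
--     """
--
--     try: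
--         # Find the index of the target element in the list
--         index = input_list.index(target_element)
--
--         # Find the previous string containing the target letters, if it exists
--         previous_string = next((x for x in reversed(input_list[:index]) if target_letters in x), None)
--
--         # Find the next string containing the target letters, if it exists
--         next_string = next((x for x in input_list[index + 1:] if target_letters in x), None)
--     except ValueError:
--         # If the target element is not found in the list, both previous and next strings are None
--         previous_string = None
--         next_string = None
--
--     return previous_string, next_string
-- ===== SOURCE B (Python) =====
-- def _find_previous_and_next_strings(input_list: list, target_element: str, target_letters: str) -> tuple:
--     prev = None
--     found = False
--     next_string = None
--     for x in input_list:
--         if not found: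
--             if x == target_element:
--                 found = True
--             elif target_letters in x:
--                 prev = x
--         else:
--             if target_letters in x:
--                 next_string = x
--                 break
--     if not found:
--         return None, None
--     return prev, next_string
-- ===== Notes on version B (the rewrite author's own statement) =====
-- stated objective: alternative
-- what changed: Replaced the index lookup plus two slice scans (one reversed) with a single forward pass keeping the last matching string seen before the target and breaking at the first match after it.
import Mathlib
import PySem

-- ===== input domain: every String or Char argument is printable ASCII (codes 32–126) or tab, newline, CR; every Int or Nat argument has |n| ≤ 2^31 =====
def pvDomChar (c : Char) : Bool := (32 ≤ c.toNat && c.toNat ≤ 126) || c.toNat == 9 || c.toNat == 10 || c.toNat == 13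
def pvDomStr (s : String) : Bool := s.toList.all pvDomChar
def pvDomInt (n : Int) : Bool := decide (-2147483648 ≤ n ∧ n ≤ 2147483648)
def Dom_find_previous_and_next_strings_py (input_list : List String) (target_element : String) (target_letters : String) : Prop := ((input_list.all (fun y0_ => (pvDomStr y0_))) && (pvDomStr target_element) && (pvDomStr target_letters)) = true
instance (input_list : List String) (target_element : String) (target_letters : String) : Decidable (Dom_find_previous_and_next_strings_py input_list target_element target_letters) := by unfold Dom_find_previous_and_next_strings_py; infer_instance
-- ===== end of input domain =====

-- B replaces A's index lookup plus two slice scans with one forward pass over the list (same cost, alternative decomposition); proved to return A's exact value on every input.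


-- ===== PORT A =====
-- A: find first index of target_element; scan input_list[:index] reversed and input_list[index+1:] for the letters.
def find_previous_and_next_strings_py (input_list : List String) (target_element : String) (target_letters : String) : Option String × Option String :=
  match PySem.List.index? input_list target_element with
  | none => (none, none)
  | some index =>
      let previous_string :=
        List.find? (fun x => PySem.Str.isIn target_letters x)
          (PySem.List.slice input_list none (some (index : Int))).reverse
      let next_string :=
        List.find? (fun x => PySem.Str.isIn target_letters x)
          (PySem.List.slice input_list (some ((index : Int) + 1)) none)
      (previous_string, next_string)

-- ===== PORT B =====
-- B: one forward pass; phase 2 of the loop (after the target was met) is pvNextPhase, phase 1 is pvPrevPhase.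
def pvNextPhase (target_letters : String) : List String → Option String
  | [] => none
  | x :: rest =>
      if PySem.Str.isIn target_letters x then some x else pvNextPhase target_letters rest

def pvPrevPhase (target_element target_letters : String) : List String → Option String → Option String × Option String
  | [], _ => (none, none)
  | x :: rest, prev =>
      if x == target_element then (prev, pvNextPhase target_letters rest)
      else pvPrevPhase target_element target_letters rest
        (if PySem.Str.isIn target_letters x then some x else prev)

def find_previous_and_next_strings_py_alt (input_list : List String) (target_element : String) (target_letters : String) : Option String × Option String :=
  pvPrevPhase target_element target_letters input_list none

-- ===== PRECONDITION & SPEC =====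
def Spec_find_previous_and_next_strings_py (input_list : List String) (target_element : String) (target_letters : String) (out : Option String × Option String) : Prop := out = find_previous_and_next_strings_py_alt input_list target_element target_letters
instance (input_list : List String) (target_element : String) (target_letters : String) (out : Option String × Option String) : Decidable (Spec_find_previous_and_next_strings_py input_list target_element target_letters out) := by unfold Spec_find_previous_and_next_strings_py; infer_instance

-- ===== CLAIM (what is proved, stated in full; the proofs are below) =====
def Claim_equal_find_previous_and_next_strings_py : Prop := ∀ (input_list : List String) (target_element : String) (target_letters : String), Dom_find_previous_and_next_strings_py input_list target_element target_letters → Spec_find_previous_and_next_strings_py input_list target_element target_letters (find_previous_and_next_strings_py input_list target_element target_letters)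

-- ===== LEMMAS AND PROOFS =====

theorem pvNextPhase_eq_find? (l : String) (xs : List String) :
    pvNextPhase l xs = List.find? (fun x => PySem.Str.isIn l x) xs := by
  induction xs with
  | nil => rfl
  | cons x rest ih => simp [pvNextPhase, List.find?]; split_ifs with h <;> simp_all

theorem pvPrevPhase_spec (t l : String) (xs : List String) (prev : Option String) :
    pvPrevPhase t l xs prev =
      match PySem.List.index? xs t with
      | none => (none, none)
      | some i =>
          ((List.find? (fun x => PySem.Str.isIn l x) (xs.take i).reverse).or prev,
           List.find? (fun x => PySem.Str.isIn l x) (xs.drop (i + 1))) := by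
  induction xs generalizing prev with
  | nil => rfl
  | cons x rest ih =>
    by_cases h : x = t
    · subst h
      rw [PySem.List.index?_cons_self]
      simp [pvPrevPhase, pvNextPhase_eq_find?]
    · have hb : (x == t) = false := by simp [h]
      rw [PySem.List.index?_cons_of_ne rest h]
      simp only [pvPrevPhase, hb]
      rw [ih]
      cases hidx : PySem.List.index? rest t with
      | none => simp
      | some j =>
        simp only [Option.map_some]
        have htake : ((x :: rest).take (j + 1)).reverse
            = (rest.take j).reverse ++ [x] := by simp
        rw [htake, List.find?_append]
        simp only [List.find?, PySem.Str.isIn_eq]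
        rcases Bool.eq_false_or_eq_true (PySem.Chars.isIn l.toList x.toList) with hpx | hpx <;>
          cases List.find? (fun x => PySem.Chars.isIn l.toList x.toList) (List.take j rest).reverse <;>
            simp [hpx]

-- ===== VERDICT (by name: the statement is the Claim_ definition above) =====
theorem find_previous_and_next_strings_py_spec : Claim_equal_find_previous_and_next_strings_py := by
  intro input_list target_element target_letters _
  unfold Spec_find_previous_and_next_strings_py
  unfold find_previous_and_next_strings_py find_previous_and_next_strings_py_alt
  rw [pvPrevPhase_spec]
  cases hidx : PySem.List.index? input_list target_element with
  | none => rfl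
  | some i =>
    have h1 : PySem.List.slice input_list none (some (i : Int)) = input_list.take i :=
      PySem.List.slice_to_natCast input_list i
    have h2 : PySem.List.slice input_list (some ((i : Int) + 1)) none = input_list.drop (i + 1) := by
      have := PySem.List.slice_from_natCast input_list (i + 1)
      simpa using this
    simp [h1, h2]
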